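-- pv_equiv track=rewrite | github.com/Kevin-Shen-and-Cipher/live-in-backend | get_house.py | floor_check
-- ===== SOURCE A (Python) =====
-- def floor_check(floor,data):
--     try:
--         out_flag= False
--         if data != []:
--                 out_flag= True
--                 floor_data = floor.split(",")
--                 for floor in floor_data:
--                     if "12_" in data:
--                         if int(floor) >= 12:
--                             out_flag = False
--                     if "6_12" in data:
--                         if int(floor) >= 6 and int(floor) < 12:
--                             out_flag = False
--                     if "2_6" in data:
--                         if int(floor) >= 2 and int(floor) < 6:
--                             out_flag = False
--                     if "0_1" in data:
--                         if int(floor) >= 0 and int(floor) < 1: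
--                             out_flag = False
--         return out_flag
--     except:
--         return True
-- ===== SOURCE B (Python) =====
-- def floor_check(floor, data):
--     try:
--         if data == []:
--             return False
--         buckets = []
--         for part in floor.split(","):
--             f = int(part)
--             if f >= 12:
--                 buckets.append("12_")
--             elif f >= 6:
--                 buckets.append("6_12")
--             elif f >= 2:
--                 buckets.append("2_6")
--             elif f == 0:
--                 buckets.append("0_1")
--             else:
--                 buckets.append(None)  # 1 <= f < 2 or f < 0: no filter bucket
--         return all(b not in data for b in buckets)
--     except ValueError:
--         return True
-- ===== Notes on version B (the rewrite author's own statement) =====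
-- stated objective: simpler
-- what changed: Inverts the traversal: instead of testing each of the four filter ranges against every floor with repeated int() calls and a mutable flag, B maps each floor once to its single bucket key and checks membership of only that key in data, returning all(bucket not in data).
import Mathlib
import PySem

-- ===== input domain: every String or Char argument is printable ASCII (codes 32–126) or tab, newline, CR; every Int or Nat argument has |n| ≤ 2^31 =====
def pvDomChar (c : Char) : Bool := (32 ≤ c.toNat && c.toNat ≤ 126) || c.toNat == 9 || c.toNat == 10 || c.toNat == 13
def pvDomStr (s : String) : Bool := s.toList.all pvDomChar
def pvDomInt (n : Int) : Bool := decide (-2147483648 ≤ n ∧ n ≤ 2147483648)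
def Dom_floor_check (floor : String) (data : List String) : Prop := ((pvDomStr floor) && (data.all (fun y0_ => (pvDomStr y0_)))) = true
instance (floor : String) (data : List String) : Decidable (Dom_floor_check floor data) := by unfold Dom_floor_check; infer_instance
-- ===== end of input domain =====

-- B inverts the traversal: each floor is mapped once to its single bucket key which is
-- membership-checked in data, instead of testing every range condition per floor (objective: simpler).
set_option maxHeartbeats 1000000


-- ===== PORT A =====
-- One iteration of A's loop: the four independent range checks, each parsing the floor string;
-- `none` models the int() exception escaping the loop (caught by A's bare except → True).
def floorStepA (data : List String) (flag : Bool) (f : List Char) : Option Bool :=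
  (if data.contains "12_" then
      (PySem.Int.ofChars? f).map (fun n => if n ≥ 12 then false else flag)
    else some flag).bind fun flag1 =>
  (if data.contains "6_12" then
      (PySem.Int.ofChars? f).map (fun n => if n ≥ 6 && n < 12 then false else flag1)
    else some flag1).bind fun flag2 =>
  (if data.contains "2_6" then
      (PySem.Int.ofChars? f).map (fun n => if n ≥ 2 && n < 6 then false else flag2)
    else some flag2).bind fun flag3 =>
  (if data.contains "0_1" then
      (PySem.Int.ofChars? f).map (fun n => if n ≥ 0 && n < 1 then false else flag3)
    else some flag3)

-- A's for-loop over the split floor strings, threading out_flag.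
def floorLoopA (data : List String) : List (List Char) → Bool → Option Bool
  | [], flag => some flag
  | f :: fs, flag => (floorStepA data flag f).bind (floorLoopA data fs)

def floor_check (floor : String) (data : List String) : Bool :=
  if data = [] then false
  else
    match floorLoopA data (PySem.Chars.splitOn floor.toList [',']) true with
    | none => true          -- the try/except: an int() failure returns True
    | some b => b

-- ===== PORT B =====
-- Bucket key of one floor string: outer `none` = int() ValueError,
-- inner `none` = the floor falls in no filter range (Python None).
def floorBucket? (f : List Char) : Option (Option String) :=
  (PySem.Int.ofChars? f).map fun n =>
    if n ≥ 12 then some "12_"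
    else if n ≥ 6 then some "6_12"
    else if n ≥ 2 then some "2_6"
    else if n = 0 then some "0_1"
    else none

-- B's loop building the bucket list (the `buckets` list in Source B); none = ValueError.
def floorBuckets? : List (List Char) → Option (List (Option String))
  | [] => some []
  | f :: fs => (floorBucket? f).bind fun b => (floorBuckets? fs).map (b :: ·)

def floor_check_alt (floor : String) (data : List String) : Bool :=
  if data = [] then false
  else
    match floorBuckets? (PySem.Chars.splitOn floor.toList [',']) with
    | none => true          -- the except ValueError: returns True
    | some bs => bs.all fun b =>
        match b with
        | none => true
        | some k => !data.contains k

-- ===== PRECONDITION & SPEC =====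
def Spec_floor_check (floor : String) (data : List String) (out : Bool) : Prop := out = floor_check_alt floor data
instance (floor : String) (data : List String) (out : Bool) : Decidable (Spec_floor_check floor data out) := by unfold Spec_floor_check; infer_instance

-- ===== CLAIM (what is proved, stated in full; the proofs are below) =====
def Claim_equal_floor_check : Prop := ∀ (floor : String) (data : List String), Dom_floor_check floor data → Spec_floor_check floor data (floor_check floor data)

-- ===== LEMMAS AND PROOFS =====

def pvHasKey (data : List String) : Bool :=
  data.contains "12_" || data.contains "6_12" || data.contains "2_6" || data.contains "0_1"

def pvNotIn (data : List String) (b : Option String) : Bool :=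
  match b with
  | none => true
  | some k => !data.contains k

lemma floorStepA_eq (data : List String) (flag : Bool) (f : List Char) :
    floorStepA data flag f =
      (match floorBucket? f with
       | none => if pvHasKey data then none else some flag
       | some ob => some (flag && pvNotIn data ob)) := by
  unfold floorStepA floorBucket? pvHasKey pvNotIn
  cases h : PySem.Int.ofChars? f with
  | none =>
      by_cases h1 : "12_" ∈ data <;>
      by_cases h2 : "6_12" ∈ data <;>
      by_cases h3 : "2_6" ∈ data <;>
      by_cases h4 : "0_1" ∈ data <;>
        simp [h, h1, h2, h3, h4, Option.bind]
  | some n =>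
      by_cases h1 : "12_" ∈ data <;>
      by_cases h2 : "6_12" ∈ data <;>
      by_cases h3 : "2_6" ∈ data <;>
      by_cases h4 : "0_1" ∈ data <;>
        simp only [Option.map_some, Option.bind] <;>
        simp only [List.contains_eq_mem, h1, h2, h3, h4, decide_true, decide_false,
          if_true] <;>
        clear h <;> split_ifs <;> simp_all <;> omega

lemma bucket_notIn_of_noKey (data : List String) (hk : pvHasKey data = false)
    (f : List Char) (ob : Option String) (hb : floorBucket? f = some ob) :
    pvNotIn data ob = true := by
  unfold pvHasKey at hk
  unfold floorBucket? at hb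
  cases h : PySem.Int.ofChars? f with
  | none => simp [h] at hb
  | some n =>
      simp [h] at hb
      unfold pvNotIn
      subst hb
      split_ifs <;> simp_all

lemma loopA_noKey (data : List String) (hk : pvHasKey data = false) :
    ∀ (fs : List (List Char)) (flag : Bool),
      floorLoopA data fs flag = some flag := by
  intro fs
  induction fs with
  | nil => intro flag; rfl
  | cons f fs ih =>
      intro flag
      rw [floorLoopA, floorStepA_eq]
      cases hb : floorBucket? f with
      | none => simp only [hk, Option.bind]; exact ih flag
      | some ob =>
          have hob := bucket_notIn_of_noKey data hk f ob hb
          simp only [hob, Bool.and_true, Option.bind]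
          exact ih flag

lemma buckets_noKey (data : List String) (hk : pvHasKey data = false) :
    ∀ (fs : List (List Char)),
      (match floorBuckets? fs with
       | none => true
       | some bs => bs.all (pvNotIn data)) = true := by
  intro fs
  induction fs with
  | nil => rfl
  | cons f fs ih =>
      rw [floorBuckets?]
      cases hb : floorBucket? f with
      | none => simp
      | some ob =>
          have hob := bucket_notIn_of_noKey data hk f ob hb
          cases hm : floorBuckets? fs with
          | none => simp [Option.bind]
          | some bs =>
              simp only [hm] at ih
              simp [Option.bind, hob, ih]

lemma loopA_hasKey (data : List String) (hk : pvHasKey data = true) :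
    ∀ (fs : List (List Char)) (flag : Bool),
      (match floorLoopA data fs flag with
       | none => true
       | some b => b)
      = (match floorBuckets? fs with
         | none => true
         | some bs => flag && bs.all (pvNotIn data)) := by
  intro fs
  induction fs with
  | nil => intro flag; simp [floorLoopA, floorBuckets?]
  | cons f fs ih =>
      intro flag
      rw [floorLoopA, floorBuckets?, floorStepA_eq]
      cases hb : floorBucket? f with
      | none => simp [hk, Option.bind]
      | some ob =>
          simp only [Option.bind]
          rw [ih (flag && pvNotIn data ob)]
          cases hm : floorBuckets? fs with
          | none => rfl
          | some bs => simp [Bool.and_assoc]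

-- ===== VERDICT (by name: the statement is the Claim_ definition above) =====
theorem floor_check_spec : Claim_equal_floor_check := by
  unfold Claim_equal_floor_check
  intro floor data _
  unfold Spec_floor_check floor_check floor_check_alt
  by_cases hd : data = []
  · simp [hd]
  · simp only [hd, if_false]
    by_cases hk : pvHasKey data
    · rw [loopA_hasKey data hk (PySem.Chars.splitOn floor.toList [',']) true]
      cases hm : floorBuckets? (PySem.Chars.splitOn floor.toList [',']) with
      | none => simp
      | some bs => simp only [Bool.true_and]; rfl
    · rw [loopA_noKey data (by simpa using hk) (PySem.Chars.splitOn floor.toList [',']) true]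
      have := buckets_noKey data (by simpa using hk) (PySem.Chars.splitOn floor.toList [','])
      cases hm : floorBuckets? (PySem.Chars.splitOn floor.toList [',']) with
      | none => simp
      | some bs =>
          simp only [hm] at this
          simpa [pvNotIn] using this.symm
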